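-- pv_equiv track=rewrite | github.com/huggingface/transformers | src/transformers/models/dpr/tokenization_dpr_fast.py | _get_best_spans
-- ===== SOURCE A (Python) =====
-- import collections
-- from typing import List, Optional, Union
--
-- DPRSpanPrediction = collections.namedtuple(
--     "DPRSpanPrediction", ["span_score", "relevance_score", "doc_id", "start_index", "end_index", "text"]
-- )
--
-- def _get_best_spans(
--
--     start_logits: List[int],
--     end_logits: List[int],
--     max_answer_length: int,
--     top_spans: int,
-- ) -> List[DPRSpanPrediction]:
--     """
--     Finds the best answer span for the extractive Q&A model for one passage. It returns the best span by descending
--     `span_score` order and keeping max `top_spans` spans. Spans longer that `max_answer_length` are ignored.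
--     """
--     scores = []
--     for start_index, start_score in enumerate(start_logits):
--         for answer_length, end_score in enumerate(end_logits[start_index : start_index + max_answer_length]):
--             scores.append(((start_index, start_index + answer_length), start_score + end_score))
--     scores = sorted(scores, key=lambda x: x[1], reverse=True)
--     chosen_span_intervals = []
--     for (start_index, end_index), score in scores:
--         assert start_index <= end_index, f"Wrong span indices: [{start_index}:{end_index}]"
--         length = end_index - start_index + 1
--         assert length <= max_answer_length, f"Span is too long: {length} > {max_answer_length}"
--         if any(
--             start_index <= prev_start_index <= prev_end_index <= end_index
--             or prev_start_index <= start_index <= end_index <= prev_end_index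
--             for (prev_start_index, prev_end_index) in chosen_span_intervals
--         ):
--             continue
--         chosen_span_intervals.append((start_index, end_index))
--
--         if len(chosen_span_intervals) == top_spans:
--             break
--     return chosen_span_intervals
-- ===== SOURCE B (Python) =====
-- def _get_best_spans(
--     start_logits,
--     end_logits,
--     max_answer_length,
--     top_spans,
-- ):
--     """Selection variant: no sort at all; repeatedly extract the first
--     highest-scoring remaining candidate by a linear scan (Python max returns
--     the first maximum, matching the stable sort's tie-break) and greedily keep
--     it unless it nests with an already chosen interval."""
--     candidates = [
--         ((si, si + al), ss + es)
--         for si, ss in enumerate(start_logits)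
--         for al, es in enumerate(end_logits[si : si + max_answer_length])
--     ]
--     chosen = []
--     while candidates:
--         best = max(range(len(candidates)), key=lambda i: candidates[i][1])
--         (si, ei), _score = candidates.pop(best)
--         if any(si <= ps <= pe <= ei or ps <= si <= ei <= pe for ps, pe in chosen):
--             continue
--         chosen.append((si, ei))
--         if len(chosen) == top_spans:
--             break
--     return chosen
-- ===== Notes on version B (the rewrite author's own statement) =====
-- stated objective: alternative
-- what changed: B never sorts: instead of stably sorting all candidate spans by descending score and scanning, it runs a selection loop that repeatedly extracts the first highest-scoring remaining candidate by a linear scan (max over indices + pop, matching the stable sort's first-maximum tie-break) and applies the same nesting filter and top_spans cutoff.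
import Mathlib
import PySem

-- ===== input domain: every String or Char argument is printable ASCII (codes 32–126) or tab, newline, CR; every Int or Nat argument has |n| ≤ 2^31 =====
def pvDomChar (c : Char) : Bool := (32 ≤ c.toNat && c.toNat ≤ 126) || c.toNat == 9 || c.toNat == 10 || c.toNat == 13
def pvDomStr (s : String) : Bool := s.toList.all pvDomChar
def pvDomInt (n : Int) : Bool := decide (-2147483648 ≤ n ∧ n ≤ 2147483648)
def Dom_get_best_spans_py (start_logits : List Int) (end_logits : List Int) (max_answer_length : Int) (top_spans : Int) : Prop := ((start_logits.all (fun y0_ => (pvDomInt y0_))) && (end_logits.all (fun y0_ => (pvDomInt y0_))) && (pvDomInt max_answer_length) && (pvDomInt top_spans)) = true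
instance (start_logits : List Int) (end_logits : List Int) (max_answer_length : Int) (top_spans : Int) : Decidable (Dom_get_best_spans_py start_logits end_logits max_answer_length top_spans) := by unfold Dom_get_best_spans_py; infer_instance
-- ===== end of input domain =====

-- B replaces A's full stable sort of all candidate spans by a selection loop that never
-- sorts: it repeatedly extracts the first highest-scoring remaining candidate by a
-- linear scan; objective: alternative.

-- the overlap test `any(start_index <= ps <= pe <= end_index or ps <= start_index <= end_index <= pe ...)`,
-- textually identical in A and in B
def pvOverlap (si ei : Int) (chosen : List (Int × Int)) : Bool :=
  chosen.any (fun pr =>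
    decide (si ≤ pr.1 ∧ pr.1 ≤ pr.2 ∧ pr.2 ≤ ei) || decide (pr.1 ≤ si ∧ si ≤ ei ∧ ei ≤ pr.2))

-- ===== PORT A =====
-- A's `for (start_index, end_index), score in scores:` loop with `continue` and `break`
def pvALoop (top_spans : Int) : List ((Int × Int) × Int) → List (Int × Int) → List (Int × Int)
  | [], chosen => chosen
  | (sp, _score) :: rest, chosen =>
    if pvOverlap sp.1 sp.2 chosen then pvALoop top_spans rest chosen
    else
      let chosen' := chosen ++ [sp]
      if (chosen'.length : Int) = top_spans then chosen' else pvALoop top_spans rest chosen'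

def get_best_spans_py (start_logits : List Int) (end_logits : List Int) (max_answer_length : Int) (top_spans : Int) : List (Int × Int) :=
  -- scores = []; for start_index, start_score in enumerate(start_logits): for answer_length, end_score in enumerate(end_logits[start_index : start_index + max_answer_length]): scores.append(...)
  let scores : List ((Int × Int) × Int) :=
    (PySem.List.enumerate start_logits).foldl (fun acc si_ss =>
      (PySem.List.enumerate (PySem.List.slice end_logits (some si_ss.1) (some (si_ss.1 + max_answer_length)))).foldl
        (fun acc2 al_es => acc2 ++ [((si_ss.1, si_ss.1 + al_es.1), si_ss.2 + al_es.2)]) acc) []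
  -- scores = sorted(scores, key=lambda x: x[1], reverse=True)  (the asserts in the loop never fire on Pre_)
  let scores := PySem.List.sorted scores (fun x => x.2) true
  pvALoop top_spans scores []

-- ===== PORT B =====
-- the list comprehension building `candidates`
def pvBCandidates (start_logits : List Int) (end_logits : List Int) (max_answer_length : Int) : List ((Int × Int) × Int) :=
  (PySem.List.enumerate start_logits).flatMap (fun si_ss =>
    (PySem.List.enumerate (PySem.List.slice end_logits (some si_ss.1) (some (si_ss.1 + max_answer_length)))).map
      (fun al_es => ((si_ss.1, si_ss.1 + al_es.1), si_ss.2 + al_es.2)))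

-- `best = max(range(len(candidates)), key=lambda i: candidates[i][1])` followed by
-- `candidates.pop(best)`: one left-to-right scan that yields the FIRST maximum-score
-- candidate together with the remaining list (Python's max keeps the earlier index on ties)
def pvExtractMax : List ((Int × Int) × Int) → Option (((Int × Int) × Int) × List ((Int × Int) × Int))
  | [] => none
  | x :: xs =>
    match pvExtractMax xs with
    | none => some (x, [])
    | some (m, rest) => if x.2 < m.2 then some (m, x :: rest) else some (x, xs)

-- termination fact the loop below cites: popping shortens the list
theorem pvExtractMax_length : ∀ (l : List ((Int × Int) × Int)) (m : (Int × Int) × Int)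
    (rest : List ((Int × Int) × Int)), pvExtractMax l = some (m, rest) → rest.length < l.length := by
  intro l
  induction l with
  | nil => intro m rest h; simp [pvExtractMax] at h
  | cons x xs ih =>
    intro m rest h
    simp only [pvExtractMax] at h
    cases hx : pvExtractMax xs with
    | none => rw [hx] at h; simp at h; simp [h.2]
    | some p =>
      obtain ⟨pm, pr⟩ := p
      rw [hx] at h
      by_cases hlt : x.2 < pm.2
      · rw [show (match some (pm, pr) with
            | none => some (x, ([] : List ((Int × Int) × Int)))
            | some (m, rest) => if x.2 < m.2 then some (m, x :: rest) else some (x, xs))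
            = if x.2 < pm.2 then some (pm, x :: pr) else some (x, xs) from rfl, if_pos hlt] at h
        obtain ⟨rfl, rfl⟩ := Prod.mk.injEq .. ▸ Option.some.injEq .. ▸ h
        have := ih pm pr (by rw [hx])
        simpa using Nat.succ_lt_succ this
      · rw [show (match some (pm, pr) with
            | none => some (x, ([] : List ((Int × Int) × Int)))
            | some (m, rest) => if x.2 < m.2 then some (m, x :: rest) else some (x, xs))
            = if x.2 < pm.2 then some (pm, x :: pr) else some (x, xs) from rfl, if_neg hlt] at h
        obtain ⟨rfl, rfl⟩ := Prod.mk.injEq .. ▸ Option.some.injEq .. ▸ h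
        simp

-- B's `while candidates:` loop: extract the first best remaining candidate, then the
-- same skip-or-append body with the `break` at top_spans
def pvSelLoop (top_spans : Int) (cands : List ((Int × Int) × Int)) (chosen : List (Int × Int)) : List (Int × Int) :=
  match h : pvExtractMax cands with
  | none => chosen
  | some (m, rest) =>
    if pvOverlap m.1.1 m.1.2 chosen then pvSelLoop top_spans rest chosen
    else
      let chosen' := chosen ++ [m.1]
      if (chosen'.length : Int) = top_spans then chosen' else pvSelLoop top_spans rest chosen'
termination_by cands.length
decreasing_by all_goals exact pvExtractMax_length cands m rest h

def get_best_spans_py_alt (start_logits : List Int) (end_logits : List Int) (max_answer_length : Int) (top_spans : Int) : List (Int × Int) :=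
  pvSelLoop top_spans (pvBCandidates start_logits end_logits max_answer_length) []

-- ===== PRECONDITION & SPEC =====
-- Pre_ excludes exactly the inputs where the Python A raises AssertionError: a negative
-- max_answer_length makes the slice end_logits[s : s+max_answer_length] wrap around and
-- produce candidate spans longer than max_answer_length, so A's `assert length <= max_answer_length`
-- fires as soon as any candidate exists.
def Pre_get_best_spans_py (start_logits : List Int) (end_logits : List Int) (max_answer_length : Int) (top_spans : Int) : Prop :=
  0 ≤ max_answer_length ∨ start_logits = [] ∨ (end_logits.length : Int) + max_answer_length ≤ 0
instance (start_logits : List Int) (end_logits : List Int) (max_answer_length : Int) (top_spans : Int) : Decidable (Pre_get_best_spans_py start_logits end_logits max_answer_length top_spans) := by unfold Pre_get_best_spans_py; infer_instance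

def pvWitness_get_best_spans_py : List Int × List Int × Int × Int := ([1, 2], [0, 3], 2, 1)

def Spec_get_best_spans_py (start_logits : List Int) (end_logits : List Int) (max_answer_length : Int) (top_spans : Int) (out : List (Int × Int)) : Prop := out = get_best_spans_py_alt start_logits end_logits max_answer_length top_spans
instance (start_logits : List Int) (end_logits : List Int) (max_answer_length : Int) (top_spans : Int) (out : List (Int × Int)) : Decidable (Spec_get_best_spans_py start_logits end_logits max_answer_length top_spans out) := by unfold Spec_get_best_spans_py; infer_instance

-- ===== CLAIM (what is proved, stated in full; the proofs are below) =====
def Claim_equal_get_best_spans_py : Prop := ∀ (start_logits : List Int) (end_logits : List Int) (max_answer_length : Int) (top_spans : Int), Dom_get_best_spans_py start_logits end_logits max_answer_length top_spans → Pre_get_best_spans_py start_logits end_logits max_answer_length top_spans → Spec_get_best_spans_py start_logits end_logits max_answer_length top_spans (get_best_spans_py start_logits end_logits max_answer_length top_spans)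

-- ===== LEMMAS AND PROOFS =====

-- inserting an element strictly greater (in key) than everything in the list puts it in front
theorem pv_insertBy_front {α : Type} (key : α → Int) (m : α) (A : List α)
    (h : ∀ a ∈ A, key a < key m) :
    PySem.List.insertBy (fun a b => decide (key b < key a)) m A = m :: A := by
  cases A with
  | nil => simp [PySem.List.insertBy]
  | cons a t => simp [PySem.List.insertBy, h a (by simp)]

-- folding elements that are ≤ m in key over `m :: A` keeps m in front
theorem pv_foldl_insertBy_cons {α : Type} (key : α → Int) (m : α) :
    ∀ (suf : List α) (A : List α), (∀ x ∈ suf, key x ≤ key m) →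
    suf.foldl (fun acc x => PySem.List.insertBy (fun a b => decide (key b < key a)) x acc) (m :: A)
      = m :: suf.foldl (fun acc x => PySem.List.insertBy (fun a b => decide (key b < key a)) x acc) A := by
  intro suf
  induction suf with
  | nil => intro A _; rfl
  | cons x t ih =>
    intro A h
    have hx : ¬ key m < key x := not_lt.mpr (h x (by simp))
    have : PySem.List.insertBy (fun a b => decide (key b < key a)) x (m :: A)
        = m :: PySem.List.insertBy (fun a b => decide (key b < key a)) x A := by
      simp [PySem.List.insertBy, hx]
    simp only [List.foldl_cons, this]
    exact ih _ (fun y hy => h y (by simp [hy]))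

-- the stable reverse sort of pre ++ m :: suf, where pre is strictly below m and suf is ≤ m,
-- starts with m followed by the stable reverse sort of pre ++ suf
theorem pv_sorted_rev_select {α : Type} (key : α → Int) (pre suf : List α) (m : α)
    (hpre : ∀ a ∈ pre, key a < key m) (hsuf : ∀ b ∈ suf, key b ≤ key m) :
    PySem.List.sorted (pre ++ m :: suf) key true = m :: PySem.List.sorted (pre ++ suf) key true := by
  rw [PySem.List.sorted_rev_eq_foldl_insertBy, PySem.List.sorted_rev_eq_foldl_insertBy]
  rw [List.foldl_append, List.foldl_append, List.foldl_cons]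
  have hmemP : ∀ a ∈ (pre.foldl (fun acc x => PySem.List.insertBy (fun a b => decide (key b < key a)) x acc) []), key a < key m := by
    intro a ha
    apply hpre
    have : a ∈ PySem.List.sorted pre key true := by
      rw [PySem.List.sorted_rev_eq_foldl_insertBy]; exact ha
    exact (PySem.List.mem_sorted pre key true a).mp this
  rw [pv_insertBy_front key m _ hmemP]
  exact pv_foldl_insertBy_cons key m suf _ hsuf

-- pvExtractMax = none exactly on the empty list
theorem pvExtractMax_eq_none {l : List ((Int × Int) × Int)}
    (h : pvExtractMax l = none) : l = [] := by
  cases l with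
  | nil => rfl
  | cons x xs =>
    exfalso
    simp only [pvExtractMax] at h
    cases hx : pvExtractMax xs with
    | none => rw [hx] at h; simp at h
    | some p => rw [hx] at h; by_cases hlt : x.2 < p.1.2 <;> simp [hlt] at h

-- pvExtractMax splits the list around its FIRST maximum: strictly smaller scores before,
-- ≤ scores after, and the rest is the list with that element removed
theorem pvExtractMax_split : ∀ (l : List ((Int × Int) × Int)) (m : (Int × Int) × Int)
    (rest : List ((Int × Int) × Int)), pvExtractMax l = some (m, rest) →
    ∃ pre suf, l = pre ++ m :: suf ∧ rest = pre ++ suf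
      ∧ (∀ p ∈ pre, p.2 < m.2) ∧ (∀ s ∈ suf, s.2 ≤ m.2) := by
  intro l
  induction l with
  | nil => intro m rest h; simp [pvExtractMax] at h
  | cons x xs ih =>
    intro m rest h
    simp only [pvExtractMax] at h
    cases hx : pvExtractMax xs with
    | none =>
      rw [hx] at h
      simp only [Option.some.injEq, Prod.mk.injEq] at h
      obtain ⟨rfl, rfl⟩ := h
      have := pvExtractMax_eq_none hx
      subst this
      exact ⟨[], [], rfl, rfl, by simp, by simp⟩
    | some p =>
      obtain ⟨pm, pr⟩ := p
      rw [hx] at h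
      rw [show (match some (pm, pr) with
          | none => some (x, ([] : List ((Int × Int) × Int)))
          | some (m, rest) => if x.2 < m.2 then some (m, x :: rest) else some (x, xs))
          = if x.2 < pm.2 then some (pm, x :: pr) else some (x, xs) from rfl] at h
      obtain ⟨pre', suf', hxs, hrest', hpre', hsuf'⟩ := ih pm pr (by rw [hx])
      have hall : ∀ y ∈ xs, y.2 ≤ pm.2 := by
        intro y hy
        rw [hxs] at hy
        rcases List.mem_append.mp hy with hy | hy
        · exact le_of_lt (hpre' y hy)
        · rcases List.mem_cons.mp hy with rfl | hy
          · exact le_refl _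
          · exact hsuf' y hy
      by_cases hlt : x.2 < pm.2
      · rw [if_pos hlt] at h
        simp only [Option.some.injEq, Prod.mk.injEq] at h
        obtain ⟨rfl, rfl⟩ := h
        refine ⟨x :: pre', suf', by simp [hxs], by simp [hrest'], ?_, hsuf'⟩
        intro q hq
        rcases List.mem_cons.mp hq with rfl | hq
        · exact hlt
        · exact hpre' q hq
      · rw [if_neg hlt] at h
        simp only [Option.some.injEq, Prod.mk.injEq] at h
        obtain ⟨rfl, rfl⟩ := h
        refine ⟨[], xs, by simp, by simp, by simp, ?_⟩
        intro s hs
        exact le_trans (hall s hs) (not_lt.mp hlt)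

-- A's loop over the stable reverse sort equals B's selection loop
theorem pv_sel_eq (ts : Int) : ∀ (n : Nat) (l : List ((Int × Int) × Int)) (chosen : List (Int × Int)),
    l.length ≤ n →
    pvALoop ts (PySem.List.sorted l (fun x => x.2) true) chosen = pvSelLoop ts l chosen := by
  intro n
  induction n with
  | zero =>
    intro l chosen h
    have : l = [] := List.eq_nil_of_length_eq_zero (Nat.le_zero.mp h)
    subst this
    rw [pvSelLoop]
    rfl
  | succ n ih =>
    intro l chosen h
    rw [pvSelLoop]
    cases hext : pvExtractMax l with
    | none =>
      have : l = [] := pvExtractMax_eq_none hext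
      subst this
      rfl
    | some p =>
      obtain ⟨pre, suf, hl, hrest, hpre, hsuf⟩ := pvExtractMax_split l p.1 p.2 hext
      have hsorted : PySem.List.sorted l (fun x => x.2) true
          = p.1 :: PySem.List.sorted p.2 (fun x => x.2) true := by
        rw [hl, hrest]
        exact pv_sorted_rev_select (fun x => x.2) pre suf p.1 hpre hsuf
      have hlen : p.2.length ≤ n := by
        have := pvExtractMax_length l p.1 p.2 hext
        omega
      rw [hsorted]
      show (if pvOverlap p.1.1.1 p.1.1.2 chosen then
              pvALoop ts (PySem.List.sorted p.2 (fun x => x.2) true) chosen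
            else
              let chosen' := chosen ++ [p.1.1]
              if (chosen'.length : Int) = ts then chosen'
              else pvALoop ts (PySem.List.sorted p.2 (fun x => x.2) true) chosen') = _
      by_cases hov : pvOverlap p.1.1.1 p.1.1.2 chosen = true
      · simp only [hov, if_true]
        exact ih p.2 chosen hlen
      · simp only [eq_false_of_ne_true hov]
        by_cases hts : ((chosen ++ [p.1.1]).length : Int) = ts
        · simp only [if_pos hts]; simp
        · simp only [hts, if_false]
          exact ih p.2 (chosen ++ [p.1.1]) hlen

-- A's foldl-append candidate construction builds B's comprehension list
theorem pv_candidates_eq (start_logits end_logits : List Int) (max_answer_length : Int) :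
    (PySem.List.enumerate start_logits).foldl (fun acc si_ss =>
      (PySem.List.enumerate (PySem.List.slice end_logits (some si_ss.1) (some (si_ss.1 + max_answer_length)))).foldl
        (fun acc2 al_es => acc2 ++ [((si_ss.1, si_ss.1 + al_es.1), si_ss.2 + al_es.2)]) acc) []
    = pvBCandidates start_logits end_logits max_answer_length := by
  have hinner : ∀ (si_ss : Int × Int) (acc : List ((Int × Int) × Int)),
      (PySem.List.enumerate (PySem.List.slice end_logits (some si_ss.1) (some (si_ss.1 + max_answer_length)))).foldl
        (fun acc2 al_es => acc2 ++ [((si_ss.1, si_ss.1 + al_es.1), si_ss.2 + al_es.2)]) acc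
      = acc ++ (PySem.List.enumerate (PySem.List.slice end_logits (some si_ss.1) (some (si_ss.1 + max_answer_length)))).map
          (fun al_es => ((si_ss.1, si_ss.1 + al_es.1), si_ss.2 + al_es.2)) := by
    intro si_ss acc
    exact PySem.List.foldl_append_singleton_eq_map _ _ _
  rw [List.foldl_ext _ _ [] (fun acc si_ss _ => hinner si_ss acc)]
  rw [PySem.List.foldl_append_eq_flatMap]
  simp [pvBCandidates]

-- ===== VERDICT (by name: the statement is the Claim_ definition above) =====
theorem get_best_spans_py_spec : Claim_equal_get_best_spans_py := by
  intro start_logits end_logits max_answer_length top_spans _hdom _hpre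
  unfold Spec_get_best_spans_py get_best_spans_py get_best_spans_py_alt
  rw [pv_candidates_eq]
  exact pv_sel_eq top_spans (pvBCandidates start_logits end_logits max_answer_length).length _ [] le_rfl
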